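-- pv_equiv track=rewrite | github.com/mohansai52/seizure-detection | app.py | count_seizure_sessions
-- ===== SOURCE A (Python) =====
-- def count_seizure_sessions(predictions):
--     if len(predictions) == 0:
--         return 0
--     sessions = 0
--     active = False
--     for p in predictions:
--         if p == 1 and not active:
--             sessions += 1
--             active = True
--         elif p == 0:
--             active = False
--     return sessions
-- ===== SOURCE B (Python) =====
-- def count_seizure_sessions(predictions):
--     filtered = [p for p in predictions if p == 0 or p == 1]
--     collapsed = filtered[:1] + [b for a, b in zip(filtered, filtered[1:]) if a != b]
--     return collapsed.count(1)
-- ===== Notes on version B (the rewrite author's own statement) =====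
-- stated objective: alternative
-- what changed: Replaces A's stateful active-flag scan with a stateless three-stage pipeline: filter to {0,1}, collapse adjacent duplicates by zipping the filtered list with its shift and keeping change points, then count the remaining 1s (each is one session start).
import Mathlib
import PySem

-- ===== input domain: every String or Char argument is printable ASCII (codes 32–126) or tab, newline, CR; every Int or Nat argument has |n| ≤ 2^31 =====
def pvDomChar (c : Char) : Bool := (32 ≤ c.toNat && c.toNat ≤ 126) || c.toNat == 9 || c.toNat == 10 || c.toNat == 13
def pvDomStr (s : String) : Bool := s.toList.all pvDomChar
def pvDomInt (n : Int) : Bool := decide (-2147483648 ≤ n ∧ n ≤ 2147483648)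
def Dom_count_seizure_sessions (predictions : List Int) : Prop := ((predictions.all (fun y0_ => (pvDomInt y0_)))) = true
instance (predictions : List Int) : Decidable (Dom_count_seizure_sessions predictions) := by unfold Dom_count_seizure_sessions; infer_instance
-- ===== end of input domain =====

-- B replaces A's active-flag state machine with a stateless pipeline: filter to {0,1}, collapse adjacent duplicates via a zip with the shifted list, then count the 1s (each surviving 1 is one session start); same cost, alternative decomposition.


-- ===== PORT A =====
-- state: (sessions, active); branch order as in A
def pvStepA (st : Int × Bool) (p : Int) : Int × Bool :=
  if p == 1 && !st.2 then (st.1 + 1, true)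
  else if p == 0 then (st.1, false)
  else st

def count_seizure_sessions (predictions : List Int) : Int :=
  if predictions.length == 0 then 0
  else (predictions.foldl pvStepA (0, false)).1

-- ===== PORT B =====
def count_seizure_sessions_alt (predictions : List Int) : Int :=
  let filtered := predictions.filter (fun p => p == 0 || p == 1)
  let collapsed := PySem.List.slice filtered none (some 1) ++
    ((filtered.zip (PySem.List.slice filtered (some 1) none)).filterMap
      (fun ab => if ab.1 != ab.2 then some ab.2 else none))
  PySem.List.count collapsed 1

-- ===== PRECONDITION & SPEC =====
def Spec_count_seizure_sessions (predictions : List Int) (out : Int) : Prop := out = count_seizure_sessions_alt predictions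
instance (predictions : List Int) (out : Int) : Decidable (Spec_count_seizure_sessions predictions out) := by unfold Spec_count_seizure_sessions; infer_instance

-- ===== CLAIM (what is proved, stated in full; the proofs are below) =====
def Claim_equal_count_seizure_sessions : Prop := ∀ (predictions : List Int), Dom_count_seizure_sessions predictions → Spec_count_seizure_sessions predictions (count_seizure_sessions predictions)

-- ===== LEMMAS AND PROOFS =====

-- reference semantics: number of sessions in xs given the 'active' flag
def pvG (xs : List Int) (b : Bool) : Int :=
  match xs, b with
  | [], _ => 0
  | x :: t, b =>
    if x = 1 then (if b then pvG t true else 1 + pvG t true)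
    else if x = 0 then pvG t false
    else pvG t b

-- A's fold computes pvG
theorem pvFoldA_eq_g (xs : List Int) (s : Int) (b : Bool) :
    (xs.foldl pvStepA (s, b)).1 = s + pvG xs b := by
  induction xs generalizing s b with
  | nil => simp [pvG]
  | cons x t ih =>
    by_cases h1 : x = 1
    · subst h1; cases b <;> simp [pvStepA, pvG, ih] <;> try ring
    · by_cases h0 : x = 0
      · subst h0; cases b <;> simp [pvStepA, pvG, h1, ih]
      · cases b <;> simp [pvStepA, pvG, h0, h1, ih]

-- pvG ignores values outside {0,1}
theorem pvG_filter (xs : List Int) (b : Bool) :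
    pvG (xs.filter (fun p => p == 0 || p == 1)) b = pvG xs b := by
  induction xs generalizing b with
  | nil => rfl
  | cons x t ih =>
    by_cases h1 : x = 1
    · subst h1; simp [pvG, ih]
    · by_cases h0 : x = 0
      · subst h0; simp [pvG, ih]
      · simp [pvG, h0, h1, ih]

-- the zip-with-shift adjacent-dedup, in the closed 'take 1 ++ filterMap' form of B
def pvDedup (xs : List Int) : List Int :=
  xs.take 1 ++ ((xs.zip xs.tail).filterMap (fun ab => if ab.1 != ab.2 then some ab.2 else none))

theorem pvDedup_cons_cons (a b : Int) (t : List Int) :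
    pvDedup (a :: b :: t) = if a = b then pvDedup (b :: t) else a :: pvDedup (b :: t) := by
  by_cases h : a = b <;> simp [pvDedup, h]

-- counting 1s after adjacent-dedup computes pvG on {0,1}-lists
theorem pvCount_dedup (ys : List Int) (hy : ∀ y ∈ ys, y = 0 ∨ y = 1) :
    ((pvDedup ys).count 1 : Int) = pvG ys false ∧
    ((pvDedup (1 :: ys)).count 1 : Int) = 1 + pvG ys true := by
  induction ys with
  | nil => simp [pvDedup, pvG]
  | cons b t ih =>
    have hb := hy b (by simp)
    have ht : ∀ y ∈ t, y = 0 ∨ y = 1 := fun y hyt => hy y (by simp [hyt])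
    obtain ⟨ih1, ih2⟩ := ih ht
    have hleft : ((pvDedup (b :: t)).count 1 : Int) = pvG (b :: t) false := by
      rcases hb with hb | hb <;> subst hb
      · rcases t with _ | ⟨c, u⟩
        · simp [pvDedup, pvG]
        · rw [pvDedup_cons_cons]
          rcases ht c (by simp) with hc | hc <;> subst hc
          · rw [if_pos rfl]
            simpa [pvG] using ih1
          · rw [if_neg (by decide)]
            simpa [pvG, List.count_cons] using ih1
      · rw [show pvG (1 :: t) false = 1 + pvG t true from by simp [pvG]]
        exact ih2
    refine ⟨hleft, ?_⟩
    rw [pvDedup_cons_cons]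
    rcases hb with hb | hb <;> subst hb
    · rw [if_neg (by decide)]
      rw [show pvG (0 :: t) true = pvG (0 :: t) false from by simp [pvG], ← hleft]
      simp
      omega
    · rw [if_pos rfl]
      simpa [pvG] using ih2

-- B in terms of pvDedup
theorem pvB_eq (predictions : List Int) :
    count_seizure_sessions_alt predictions
      = ((pvDedup (predictions.filter (fun p => p == 0 || p == 1))).count 1 : Int) := by
  unfold count_seizure_sessions_alt pvDedup
  simp [PySem.List.slice_to, PySem.List.slice_from_one, PySem.List.count_eq]

theorem pvFiltered_mem (predictions : List Int) :
    ∀ y ∈ predictions.filter (fun p => p == 0 || p == 1), y = 0 ∨ y = 1 := by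
  intro y hy
  have := List.of_mem_filter hy
  simpa using this

-- ===== VERDICT (by name: the statement is the Claim_ definition above) =====
theorem count_seizure_sessions_spec : Claim_equal_count_seizure_sessions := by
  intro predictions _
  unfold Spec_count_seizure_sessions count_seizure_sessions
  rw [pvB_eq, (pvCount_dedup _ (pvFiltered_mem predictions)).1, pvG_filter]
  cases predictions with
  | nil => simp [pvG]
  | cons x t => simpa using pvFoldA_eq_g (x :: t) 0 false
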